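-- pv_equiv track=rewrite | github.com/LocusLontrime/Python | CodeWars_Rush/_5kyu/The_Bee_5kyu.py | the_bee
-- ===== SOURCE A (Python) =====
-- def the_bee(n: int):
--     """top-down version, too slow"""
--     ...
--     "Good luck, ebi sobak!"
--     # memoization:
--     dp = dict()
--     # restrictions:
--     k = n - 1
--     length = 2 * k + 1
--
--     restricted_cells = set()
--     for j in range(n - 1):
--         for i in range(j, n - 1):
--             restricted_cells.add((j, n + i))
--             restricted_cells.add((n + i, j))
--
--     # core function:
--     def rec_path_seeker(y: int, x: int):
--         if (y, x) not in restricted_cells: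
--             # base case:
--             if length - 1 in [y, x]:
--                 return 1
--             # recursion body:
--
--             # memo check:
--             if (y, x) not in dp.keys():
--                 # recurrent relation:
--                 y_, x_ = y + 1, x + 1
--                 dp[(y, x)] = rec_path_seeker(y_, x) + rec_path_seeker(y, x_) + rec_path_seeker(y_, x_)
--             return dp[(y, x)]
--         else:
--             return 0
--
--     return rec_path_seeker(0, 0)
-- ===== SOURCE B (Python) =====
-- def the_bee(n: int):
--     """bottom-up version: fill the DP table row by row from the bottom"""
--     restricted_cells = set()
--     for j in range(n - 1):
--         for i in range(j, n - 1):
--             restricted_cells.add((j, n + i))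
--             restricted_cells.add((n + i, j))
--     length = 2 * (n - 1) + 1
--     row = []
--     for y in range(length - 1, -1, -1):
--         new = []
--         for x in range(length - 1, -1, -1):
--             if (y, x) in restricted_cells:
--                 v = 0
--             elif y == length - 1 or x == length - 1:
--                 v = 1
--             else:
--                 v = row[x] + new[0] + row[x + 1]
--             new = [v] + new
--         row = new
--     return row[0]
-- ===== Notes on version B (the rewrite author's own statement) =====
-- stated objective: alternative
-- what changed: Replaces the top-down memoized recursion over (y,x) with an iterative bottom-up dynamic program that fills the table row by row (each row computed right-to-left from the previous row), removing recursion and the dict cache entirely.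
-- outside the precondition, e.g. on the_bee(0): A raises RecursionError, B raises IndexError
import Mathlib
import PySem

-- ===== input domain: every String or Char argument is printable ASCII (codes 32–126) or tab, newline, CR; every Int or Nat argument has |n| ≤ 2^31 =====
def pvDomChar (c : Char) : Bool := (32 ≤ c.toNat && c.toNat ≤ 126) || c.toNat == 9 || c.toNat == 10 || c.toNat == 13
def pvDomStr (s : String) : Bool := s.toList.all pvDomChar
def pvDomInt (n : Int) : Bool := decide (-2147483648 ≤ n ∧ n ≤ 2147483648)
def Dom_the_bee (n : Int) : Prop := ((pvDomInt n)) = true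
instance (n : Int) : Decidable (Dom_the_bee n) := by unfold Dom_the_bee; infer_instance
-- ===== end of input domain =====

-- B replaces A's top-down memoized recursion by an iterative bottom-up row-by-row DP (objective:
-- alternative — no recursion, no dict cache, same O(n^2) cost).  Equivalence of the RETURN value is
-- proved for n ≥ 1 (Pre_); for n ≤ 0 both Pythons raise (A: RecursionError, B: IndexError).

-- ===== PORT A =====
-- Cells are pairs (y, x) with 0 ≤ y, x < length = 2n-1 everywhere A and B read or write them, so Python's
-- hash set of cells / dict keyed by cells are represented over the grid: index y*length+x into an array.
def beeIdx (length y x : Int) : Nat := (y * length + x).toNat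

-- membership test '(y, x) in restricted_cells' (shared by both ports; exact on the grid, where every
-- query made from (0,0) lies)
def beeSetMem (R : Array Bool) (length y x : Int) : Bool := R.getD (beeIdx length y x) false

-- the restricted_cells set, built exactly as both Pythons build it with the same two loops (both ports
-- use this helper; set.add → mark the cell's index true)
def beeRestricted (n : Int) : Array Bool :=
  let length := 2 * (n - 1) + 1
  (PySem.List.pyRange 0 (n - 1) 1).foldl (fun s j =>
    (PySem.List.pyRange j (n - 1) 1).foldl (fun s i =>
      ((s.set! (beeIdx length j (n + i)) true).set! (beeIdx length (n + i) j) true)) s)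
    (Array.replicate (length * length).toNat false)

-- the memo dict dp, keyed by grid cells: an Option-array over the grid ((y,x) ∉ dp ↔ none at its index)
def beeDictMem (dp : Array (Option Int)) (length y x : Int) : Bool :=
  (dp.getD (beeIdx length y x) none).isSome
def beeDictGet (dp : Array (Option Int)) (length y x : Int) : Int :=
  (dp.getD (beeIdx length y x) none).getD 0
def beeDictSet (dp : Array (Option Int)) (length y x v : Int) : Array (Option Int) :=
  dp.setIfInBounds (beeIdx length y x) (some v)  -- = dp.set!; the index is always in bounds here

-- A's rec_path_seeker with its memo dict `dp` threaded through the recursion (each call returns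
-- (value, dp)); the three recursive calls are evaluated left to right sharing dp, as in Python.
-- A fuel argument makes the recursion total; the top-level call supplies fuel (2*length).toNat, more
-- than the recursion depth A ever reaches from (0,0) when n ≥ 1 (fuel 0 is never hit there).
-- `dp[(y, x)]` is ported as beeDictGet: exact there, since that key was just checked/inserted.
def beeRecM (R : Array Bool) (length : Int) :
    Nat → Int → Int → Array (Option Int) → Int × Array (Option Int)
  | 0, _, _, dp => (0, dp)
  | fuel + 1, y, x, dp =>
    if ¬ (beeSetMem R length y x = true) then
      if length - 1 = y ∨ length - 1 = x then (1, dp)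
      else
        let dp' :=
          if ¬ (beeDictMem dp length y x = true) then
            let r1 := beeRecM R length fuel (y + 1) x dp
            let r2 := beeRecM R length fuel y (x + 1) r1.2
            let r3 := beeRecM R length fuel (y + 1) (x + 1) r2.2
            beeDictSet r3.2 length y x (r1.1 + r2.1 + r3.1)
          else dp
        (beeDictGet dp' length y x, dp')
    else (0, dp)

def the_bee (n : Int) : Int :=
  let restricted := beeRestricted n
  let k := n - 1
  let length := 2 * k + 1
  let dp : Array (Option Int) := Array.replicate (length * length).toNat none
  (beeRecM restricted length (2 * length).toNat 0 0 dp).1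

-- ===== PORT B =====
-- Python list indexing row[x] with 0 ≤ x < len row (always the case where B uses it); exact there.
def beeGet (xs : List Int) (i : Int) : Int := xs.getD i.toNat 0

-- inner loop of Source B: build the new row right-to-left; argument k counts remaining iterations,
-- so the call with k computes the entries for x = length-k, …, length-1.
def beeRow (R : Array Bool) (length : Int) (row : List Int) (y : Int) : Nat → List Int
  | 0 => []
  | k + 1 =>
    let rest := beeRow R length row y k
    let x : Int := length - (k + 1)
    let v : Int :=
      if beeSetMem R length y x = true then 0
      else if y = length - 1 ∨ x = length - 1 then 1
      else beeGet row x + beeGet rest 0 + beeGet row (x + 1)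
    v :: rest

-- outer loop of Source B: after m iterations `row` is the table row for y = length - m.
def beeRows (R : Array Bool) (length : Int) : Nat → List Int
  | 0 => []
  | m + 1 => beeRow R length (beeRows R length m) (length - (m + 1)) length.toNat

def the_bee_alt (n : Int) : Int :=
  let restricted := beeRestricted n
  let length := 2 * (n - 1) + 1
  beeGet (beeRows restricted length length.toNat) 0

-- ===== PRECONDITION & SPEC =====
-- For n ≤ 0 both Pythons raise (A: unbounded recursion hits the interpreter's RecursionError;
-- B: IndexError on row[0] of an empty row): Pre_ keeps exactly the inputs on which A returns.
def Pre_the_bee (n : Int) : Prop := 1 ≤ n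
instance (n : Int) : Decidable (Pre_the_bee n) := by unfold Pre_the_bee; infer_instance
def pvWitness_the_bee : Int := 3

def Spec_the_bee (n : Int) (out : Int) : Prop := out = the_bee_alt n
instance (n : Int) (out : Int) : Decidable (Spec_the_bee n out) := by unfold Spec_the_bee; infer_instance

-- ===== CLAIM (what is proved, stated in full; the proofs are below) =====
def Claim_equal_the_bee : Prop := ∀ (n : Int), Dom_the_bee n → Pre_the_bee n → Spec_the_bee n (the_bee n)

-- ===== LEMMAS AND PROOFS =====

-- proof-side specification value: A's recursion without the cache (used only in the proofs)
def beeRec (R : Array Bool) (length : Int) : Nat → Int → Int → Int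
  | 0, _, _ => 0
  | fuel + 1, y, x =>
    if ¬ (beeSetMem R length y x = true) then
      if length - 1 = y ∨ length - 1 = x then 1
      else
        beeRec R length fuel (y + 1) x + beeRec R length fuel y (x + 1) +
          beeRec R length fuel (y + 1) (x + 1)
    else 0

-- grid indices are in bounds and injective on the grid
theorem beeIdx_lt (L y x : Int) (hy0 : 0 ≤ y) (hy : y < L) (hx0 : 0 ≤ x) (hx : x < L) :
    beeIdx L y x < (L * L).toNat := by
  have h1 : y * L + x < L * L := by nlinarith
  have h2 : 0 ≤ y * L := mul_nonneg hy0 (by omega)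
  unfold beeIdx
  omega

theorem beeIdx_inj (L y x y' x' : Int) (hy0 : 0 ≤ y) (hy : y < L) (hx0 : 0 ≤ x) (hx : x < L)
    (hy0' : 0 ≤ y') (_hyL' : y' < L) (hx0' : 0 ≤ x') (hx' : x' < L)
    (h : beeIdx L y x = beeIdx L y' x') : y = y' ∧ x = x' := by
  have h2 : 0 ≤ y * L := mul_nonneg hy0 (by omega)
  have h2' : 0 ≤ y' * L := mul_nonneg hy0' (by omega)
  unfold beeIdx at h
  have he : y * L + x = y' * L + x' := by omega
  have hL0 : L ≠ 0 := by omega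
  have d1 : (x + y * L) / L = y := by
    rw [Int.add_mul_ediv_right x y hL0, Int.ediv_eq_zero_of_lt hx0 hx, zero_add]
  have d2 : (x' + y' * L) / L = y' := by
    rw [Int.add_mul_ediv_right x' y' hL0, Int.ediv_eq_zero_of_lt hx0' hx', zero_add]
  have hyy : y = y' := by rw [← d1, ← d2, add_comm x (y * L), add_comm x' (y' * L), he]
  constructor
  · exact hyy
  · rw [hyy] at he; omega

-- every value cached in dp is the canonical beeRec value of its key (and dp keeps the grid's size)
def BeeInv (R : Array Bool) (L : Int) (dp : Array (Option Int)) : Prop :=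
  dp.size = (L * L).toNat ∧
  ∀ y x v, 0 ≤ y → y < L → 0 ≤ x → x < L →
    dp[beeIdx L y x]? = some (some v) → v = beeRec R L (2 * L).toNat y x

-- fuel stability: once the fuel exceeds the remaining depth bound, beeRec's value no longer depends on it
theorem beeRec_stable (R : Array Bool) (L : Int) :
    ∀ (c f₁ f₂ : Nat) (y x : Int), y ≤ L - 1 → x ≤ L - 1 →
      (2 * L - 2 - y - x).toNat < c → c ≤ f₁ → c ≤ f₂ →
      beeRec R L f₁ y x = beeRec R L f₂ y x := by
  intro c
  induction c with
  | zero => omega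
  | succ c ih =>
    intro f₁ f₂ y x hy hx hd h1 h2
    obtain ⟨a, rfl⟩ : ∃ a, f₁ = a + 1 := ⟨f₁ - 1, by omega⟩
    obtain ⟨b, rfl⟩ : ∃ b, f₂ = b + 1 := ⟨f₂ - 1, by omega⟩
    simp only [beeRec]
    by_cases hm : beeSetMem R L y x = true
    · rw [if_neg (not_not_intro hm), if_neg (not_not_intro hm)]
    · rw [if_pos hm, if_pos hm]
      by_cases hb : L - 1 = y ∨ L - 1 = x
      · rw [if_pos hb, if_pos hb]
      · rw [if_neg hb, if_neg hb]
        have hy' : y < L - 1 := by omega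
        have hx' : x < L - 1 := by omega
        have e1 := ih a b (y + 1) x (by omega) hx (by omega) (by omega) (by omega)
        have e2 := ih a b y (x + 1) hy (by omega) (by omega) (by omega) (by omega)
        have e3 := ih a b (y + 1) (x + 1) (by omega) (by omega) (by omega) (by omega) (by omega)
        rw [e1, e2, e3]

-- unfolding the canonical value one step (enough fuel on both sides, via beeRec_stable)
theorem beeRec_canonical_step (R : Array Bool) (L : Int) (y x : Int)
    (hL : 1 ≤ L) (hy0 : 0 ≤ y) (hx0 : 0 ≤ x) (hy : y < L - 1) (hx : x < L - 1)
    (hm : ¬ (beeSetMem R L y x = true)) :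
    beeRec R L (2 * L).toNat y x =
      beeRec R L (2 * L).toNat (y + 1) x + beeRec R L (2 * L).toNat y (x + 1) +
        beeRec R L (2 * L).toNat (y + 1) (x + 1) := by
  obtain ⟨G, hG⟩ : ∃ G, (2 * L).toNat = G + 1 := ⟨(2 * L).toNat - 1, by omega⟩
  conv_lhs => rw [hG]
  simp only [beeRec]
  rw [if_pos hm, if_neg (by omega : ¬(L - 1 = y ∨ L - 1 = x))]
  have e1 := beeRec_stable R L ((2 * L - 2 - (y + 1) - x).toNat + 1) G (2 * L).toNat (y + 1) x
    (by omega) (by omega) (by omega) (by omega) (by omega)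
  have e2 := beeRec_stable R L ((2 * L - 2 - y - (x + 1)).toNat + 1) G (2 * L).toNat y (x + 1)
    (by omega) (by omega) (by omega) (by omega) (by omega)
  have e3 := beeRec_stable R L ((2 * L - 2 - (y + 1) - (x + 1)).toNat + 1) G (2 * L).toNat (y + 1) (x + 1)
    (by omega) (by omega) (by omega) (by omega) (by omega)
  rw [e1, e2, e3]

-- the memoized recursion returns the canonical value and preserves the cache invariant
theorem beeRecM_correct (R : Array Bool) (L : Int) (hL : 1 ≤ L) :
    ∀ (fuel : Nat) (y x : Int) (dp : Array (Option Int)),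
      0 ≤ y → y ≤ L - 1 → 0 ≤ x → x ≤ L - 1 → (2 * L - 2 - y - x).toNat < fuel →
      BeeInv R L dp →
      (beeRecM R L fuel y x dp).1 = beeRec R L (2 * L).toNat y x ∧
        BeeInv R L (beeRecM R L fuel y x dp).2 := by
  intro fuel
  induction fuel with
  | zero => intro y x dp _ _ _ _ hd _; exact absurd hd (Nat.not_lt_zero _)
  | succ fuel ih =>
    intro y x dp hy0 hy hx0 hx hd hinv
    obtain ⟨G, hG⟩ : ∃ G, (2 * L).toNat = G + 1 := ⟨(2 * L).toNat - 1, by omega⟩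
    simp only [beeRecM]
    by_cases hm : beeSetMem R L y x = true
    · rw [if_neg (not_not_intro hm)]
      refine ⟨?_, hinv⟩
      rw [hG]
      simp only [beeRec]
      rw [if_neg (not_not_intro hm)]
    · rw [if_pos hm]
      by_cases hb : L - 1 = y ∨ L - 1 = x
      · rw [if_pos hb]
        refine ⟨?_, hinv⟩
        rw [hG]
        simp only [beeRec]
        rw [if_pos hm, if_pos hb]
      · rw [if_neg hb]
        have hy' : y < L - 1 := by omega
        have hx' : x < L - 1 := by omega
        obtain ⟨hsz, hval⟩ := hinv
        by_cases hk : beeDictMem dp L y x = true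
        · rw [if_neg (not_not_intro hk)]
          obtain ⟨v, hv⟩ : ∃ v, dp[beeIdx L y x]? = some (some v) := by
            unfold beeDictMem at hk
            rw [Array.getD_eq_getD_getElem?] at hk
            rcases h : dp[beeIdx L y x]? with _ | o
            · rw [h] at hk; simp at hk
            · rcases o with _ | v
              · rw [h] at hk; simp at hk
              · exact ⟨v, rfl⟩
          refine ⟨?_, hsz, hval⟩
          show beeDictGet dp L y x = _
          unfold beeDictGet
          rw [Array.getD_eq_getD_getElem?, hv, Option.getD_some, Option.getD_some]
          exact hval y x v hy0 (by omega) hx0 (by omega) hv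
        · rw [if_pos hk]
          obtain ⟨ih1, ihv1⟩ := ih (y + 1) x dp (by omega) (by omega) hx0 hx (by omega) ⟨hsz, hval⟩
          obtain ⟨ih2, ihv2⟩ := ih y (x + 1) _ hy0 hy (by omega) (by omega) (by omega) ihv1
          obtain ⟨ih3, ihv3⟩ := ih (y + 1) (x + 1) _ (by omega) (by omega) (by omega) (by omega)
            (by omega) ihv2
          obtain ⟨hsz3, hval3⟩ := ihv3
          have hsum : (beeRecM R L fuel (y + 1) x dp).1 +
              (beeRecM R L fuel y (x + 1) (beeRecM R L fuel (y + 1) x dp).2).1 +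
              (beeRecM R L fuel (y + 1) (x + 1)
                (beeRecM R L fuel y (x + 1) (beeRecM R L fuel (y + 1) x dp).2).2).1 =
              beeRec R L (2 * L).toNat y x := by
            rw [ih1, ih2, ih3, beeRec_canonical_step R L y x hL hy0 hx0 hy' hx' hm]
          have hbound : beeIdx L y x <
              (beeRecM R L fuel (y + 1) (x + 1)
                (beeRecM R L fuel y (x + 1) (beeRecM R L fuel (y + 1) x dp).2).2).2.size := by
            rw [hsz3]
            exact beeIdx_lt L y x hy0 (by omega) hx0 (by omega)
          constructor
          · show beeDictGet _ L y x = _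
            unfold beeDictGet beeDictSet
            rw [Array.getD_eq_getD_getElem?, Array.getElem?_setIfInBounds, if_pos rfl,
              if_pos hbound, Option.getD_some, Option.getD_some, hsum]
          · constructor
            · show (Array.setIfInBounds _ _ _).size = _
              rw [Array.size_setIfInBounds]
              exact hsz3
            · intro y' x' v hy0' hyL' hx0' hxL' hv
              unfold beeDictSet at hv
              rw [Array.getElem?_setIfInBounds] at hv
              by_cases hij : beeIdx L y x = beeIdx L y' x'
              · obtain ⟨h1, h2⟩ := beeIdx_inj L y x y' x' hy0 (by omega) hx0 (by omega)
                  hy0' hyL' hx0' hxL' hij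
                subst h1; subst h2
                rw [if_pos hij, if_pos hbound] at hv
                have : (beeRecM R L fuel (y + 1) x dp).1 +
                    (beeRecM R L fuel y (x + 1) (beeRecM R L fuel (y + 1) x dp).2).1 +
                    (beeRecM R L fuel (y + 1) (x + 1)
                      (beeRecM R L fuel y (x + 1) (beeRecM R L fuel (y + 1) x dp).2).2).1 = v := by
                  have h3 := Option.some_inj.mp hv
                  exact Option.some_inj.mp h3
                rw [← this, hsum]
              · rw [if_neg hij] at hv
                exact hval3 y' x' v hy0' hyL' hx0' hxL' hv

-- one row: if `row` holds the beeRec values of line y+1, the row built by beeRow holds those of line y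
theorem beeRow_entry (R : Array Bool) (L : Int) (row : List Int) (y : Int)
    (hL : 1 ≤ L) (hy0 : 0 ≤ y) (hy : y ≤ L - 1)
    (H : y < L - 1 → ∀ j : Nat, (j : Int) ≤ L - 1 →
        row.getD j 0 = beeRec R L (2 * L).toNat (y + 1) (j : Int)) :
    ∀ (k : Nat), (k : Int) ≤ L → ∀ (j : Nat), j < k →
      (beeRow R L row y k).getD j 0 = beeRec R L (2 * L).toNat y (L - k + j) := by
  intro k
  induction k with
  | zero => intro _ j hj; omega
  | succ k ih =>
    intro hk j hj
    have hk' : (k : Int) + 1 ≤ L := by push_cast at hk; omega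
    rcases j with _ | j
    · -- head entry, x = L - (k+1)
      simp only [beeRow, List.getD_cons_zero]
      have hxe : L - ((k + 1 : Nat) : Int) + ((0 : Nat) : Int) = L - ((k : Int) + 1) := by
        push_cast; ring
      rw [hxe]
      set x : Int := L - ((k : Int) + 1) with hxdef
      have hx0 : (0 : Int) ≤ x := by omega
      have hx1 : x ≤ L - 1 := by omega
      obtain ⟨F, hF⟩ : ∃ F, (2 * L).toNat = F + 1 := ⟨(2 * L).toNat - 1, by omega⟩
      rw [hF]
      simp only [beeRec]
      by_cases hm : beeSetMem R L y x = true
      · rw [if_pos hm, if_neg (not_not_intro hm)]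
      · rw [if_neg hm, if_pos hm]
        by_cases hb : y = L - 1 ∨ x = L - 1
        · rw [if_pos hb, if_pos (by omega : L - 1 = y ∨ L - 1 = x)]
        · rw [if_neg hb, if_neg (by omega : ¬(L - 1 = y ∨ L - 1 = x))]
          have hy' : y < L - 1 := by omega
          have hx' : x < L - 1 := by omega
          have hk1 : 1 ≤ k := by omega
          have t1 : beeGet row x = beeRec R L F (y + 1) x := by
            have h := H hy' x.toNat (by omega)
            rw [show ((x.toNat : Int)) = x from by omega] at h
            unfold beeGet
            rw [h, hF]
            exact beeRec_stable R L ((2 * L - 2 - (y + 1) - x).toNat + 1) _ _ (y + 1) x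
              (by omega) hx1 (by omega) (by omega) (by omega)
          have t2 : beeGet (beeRow R L row y k) 0 = beeRec R L F y (x + 1) := by
            unfold beeGet
            have h := ih (by omega) 0 (by omega)
            simp only [Int.toNat_zero] at h ⊢
            rw [h, show L - (k : Int) + ((0 : Nat) : Int) = x + 1 from by push_cast; omega, hF]
            exact beeRec_stable R L ((2 * L - 2 - y - (x + 1)).toNat + 1) _ _ y (x + 1)
              hy (by omega) (by omega) (by omega) (by omega)
          have t3 : beeGet row (x + 1) = beeRec R L F (y + 1) (x + 1) := by
            have h := H hy' (x + 1).toNat (by omega)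
            rw [show (((x + 1).toNat : Int)) = x + 1 from by omega] at h
            unfold beeGet
            rw [h, hF]
            exact beeRec_stable R L ((2 * L - 2 - (y + 1) - (x + 1)).toNat + 1) _ _ (y + 1) (x + 1)
              (by omega) (by omega) (by omega) (by omega) (by omega)
          rw [t1, t2, t3]
    · -- tail entry
      simp only [beeRow, List.getD_cons_succ]
      rw [ih (by omega) j (by omega)]
      congr 1
      push_cast
      ring

-- all rows: after m+1 outer iterations, `row` holds the beeRec values of line L-(m+1)
theorem beeRows_entry (R : Array Bool) (L : Int) (hL : 1 ≤ L) :
    ∀ (m : Nat), (m : Int) + 1 ≤ L → ∀ (j : Nat), (j : Int) ≤ L - 1 →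
      (beeRows R L (m + 1)).getD j 0 = beeRec R L (2 * L).toNat (L - ((m : Int) + 1)) (j : Int) := by
  intro m
  induction m with
  | zero =>
    intro hm j hj
    simp only [beeRows]
    have h := beeRow_entry R L [] (L - (((0 : Nat) : Int) + 1)) hL (by push_cast; omega)
      (by push_cast; omega) (fun hlt => absurd hlt (by push_cast; omega))
      L.toNat (by omega) j (by omega)
    rw [show L - ((L.toNat : Nat) : Int) + (j : Int) = (j : Int) from by omega] at h
    exact h
  | succ m ih =>
    intro hm j hj
    have hm' : (m : Int) + 1 + 1 ≤ L := by push_cast at hm; omega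
    simp only [beeRows]
    have H : (L - (((m + 1 : Nat) : Int) + 1)) < L - 1 → ∀ i : Nat, (i : Int) ≤ L - 1 →
        (beeRows R L (m + 1)).getD i 0
          = beeRec R L (2 * L).toNat ((L - (((m + 1 : Nat) : Int) + 1)) + 1) (i : Int) := by
      intro _ i hi
      rw [ih (by omega) i hi]
      congr 1
      push_cast
      ring
    have h := beeRow_entry R L (beeRows R L (m + 1)) (L - (((m + 1 : Nat) : Int) + 1)) hL
      (by push_cast; omega) (by push_cast; omega) H L.toNat (by omega) j (by omega)
    rw [show L - ((L.toNat : Nat) : Int) + (j : Int) = (j : Int) from by omega] at h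
    exact h

-- ===== VERDICT (by name: the statement is the Claim_ definition above) =====
theorem the_bee_spec : Claim_equal_the_bee := by
  intro n _ hpre
  unfold Spec_the_bee the_bee the_bee_alt beeGet
  dsimp only
  have hpre' : (1 : Int) ≤ n := hpre
  set R := beeRestricted n with hR
  set L : Int := 2 * (n - 1) + 1 with hLdef
  have hL : 1 ≤ L := by omega
  obtain ⟨m, hm⟩ : ∃ m : Nat, L.toNat = m + 1 := ⟨L.toNat - 1, by omega⟩
  have hmem : (beeRecM R L (2 * L).toNat 0 0 (Array.replicate (L * L).toNat none)).1 =
      beeRec R L (2 * L).toNat 0 0 := by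
    refine (beeRecM_correct R L hL (2 * L).toNat 0 0 _ (by omega) (by omega) (by omega)
      (by omega) (by omega) ⟨Array.size_replicate, ?_⟩).1
    intro y x v _ _ _ _ hv
    rw [Array.getElem?_replicate] at hv
    split_ifs at hv
    all_goals simp_all
  have h := beeRows_entry R L hL m (by omega) 0 (by omega)
  rw [hmem, hm, Int.toNat_zero, h, show L - ((m : Int) + 1) = 0 from by omega, Nat.cast_zero]
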